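-- pv_equiv track=rewrite | github.com/RinaKosh/Python | HomeWork07/Calculator/expparser.py | check_not_valid
-- ===== SOURCE A (Python) =====
-- def is_operator(char):
--     return char in ['-', '+', '/', '*', '=']
--
-- def check_not_valid(string: str):
--     invalid = False
--     for i in range(len(string)):
--         char = string[i]
--         if not is_operator(char) and not char.isdigit():
--             invalid = True
--             break
--         if i + 1 < len(string):
--             next_char = string[i + 1]
--             if is_operator(char) and is_operator(next_char):
--                 invalid = True
--                 break
--     if invalid:
--         return invalid
--
--     return invalid
-- ===== SOURCE B (Python) =====
-- OPS = {'-', '+', '/', '*', '='}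
--
-- def check_not_valid(string: str):
--     if any(c not in OPS and not c.isdigit() for c in string):
--         return True
--     if any(a in OPS and b in OPS for a, b in zip(string, string[1:])):
--         return True
--     return False
-- ===== Notes on version B (the rewrite author's own statement) =====
-- stated objective: simpler
-- what changed: Replaced the single indexed scan with break/early-exit and an accumulator flag by two separate declarative passes: one any() over characters for disallowed characters, one any() over zip(string, string[1:]) for adjacent operator pairs.
import Mathlib
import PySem

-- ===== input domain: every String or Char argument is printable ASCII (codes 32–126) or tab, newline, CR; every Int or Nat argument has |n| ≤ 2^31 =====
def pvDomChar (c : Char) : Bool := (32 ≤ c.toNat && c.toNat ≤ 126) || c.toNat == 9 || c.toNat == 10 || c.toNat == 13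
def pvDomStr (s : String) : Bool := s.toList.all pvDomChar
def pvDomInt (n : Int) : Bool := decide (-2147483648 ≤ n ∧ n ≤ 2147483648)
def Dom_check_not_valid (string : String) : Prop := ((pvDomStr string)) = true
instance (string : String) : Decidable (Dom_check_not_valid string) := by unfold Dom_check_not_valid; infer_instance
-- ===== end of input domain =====

-- B replaces A's single indexed scan with early exit by two separate declarative passes
-- (bad-character scan, then adjacent-operator-pair scan over zipped neighbours); simpler, same cost.

-- ===== PORT A =====
def is_operator (char : Char) : Bool := ['-', '+', '/', '*', '='].contains char

-- the for-i loop: current char plus lookahead at i+1, with break on the first violation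
def checkLoopA : List Char → Bool
  | [] => false
  | char :: rest =>
    if !is_operator char && !PySem.Chars.isdigit char then true
    else
      match rest with
      | [] => false
      | next_char :: _ =>
        if is_operator char && is_operator next_char then true
        else checkLoopA rest

def check_not_valid (string : String) : Bool := checkLoopA string.toList

-- ===== PORT B =====
def opsB : List Char := ['-', '+', '/', '*', '=']

def check_not_valid_alt (string : String) : Bool :=
  if string.toList.any (fun c => !opsB.contains c && !PySem.Chars.isdigit c) then true
  else if (string.toList.zip string.toList.tail).any
            (fun p => opsB.contains p.1 && opsB.contains p.2) then true
  else false

-- ===== PRECONDITION & SPEC =====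
def Spec_check_not_valid (string : String) (out : Bool) : Prop := out = check_not_valid_alt string
instance (string : String) (out : Bool) : Decidable (Spec_check_not_valid string out) := by unfold Spec_check_not_valid; infer_instance

-- ===== CLAIM (what is proved, stated in full; the proofs are below) =====
def Claim_equal_check_not_valid : Prop := ∀ (string : String), Dom_check_not_valid string → Spec_check_not_valid string (check_not_valid string)

-- ===== LEMMAS AND PROOFS =====
theorem checkLoopA_eq_any (l : List Char) :
    checkLoopA l =
      (l.any (fun c => !opsB.contains c && !PySem.Chars.isdigit c)
       || (l.zip l.tail).any (fun p => opsB.contains p.1 && opsB.contains p.2)) := by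
  induction l with
  | nil => rfl
  | cons c rest ih =>
    cases rest with
    | nil => simp [checkLoopA, is_operator, opsB]
    | cons n t =>
      simp only [checkLoopA, is_operator, opsB, List.any_cons, List.tail_cons,
        List.zip_cons_cons] at *
      rw [ih]
      cases hb : (!(['-', '+', '/', '*', '='].contains c) && !(PySem.Chars.isdigit c)) <;>
        cases hp : (['-', '+', '/', '*', '='].contains c && ['-', '+', '/', '*', '='].contains n) <;>
          simp only [hb, hp, if_true, if_false, Bool.false_or, Bool.true_or, Bool.or_true,
            Bool.or_assoc, Bool.or_left_comm, Bool.false_eq_true, ite_false, ite_true]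

-- ===== VERDICT (by name: the statement is the Claim_ definition above) =====
theorem check_not_valid_spec : Claim_equal_check_not_valid := by
  intro s _
  unfold Spec_check_not_valid check_not_valid check_not_valid_alt
  rw [checkLoopA_eq_any]
  cases h1 : s.toList.any (fun c => !opsB.contains c && !PySem.Chars.isdigit c) <;>
    cases h2 : (s.toList.zip s.toList.tail).any
        (fun p => opsB.contains p.1 && opsB.contains p.2) <;>
      simp only [h1, h2, if_true, if_false, Bool.false_or, Bool.true_or, Bool.or_true,
        Bool.or_false, Bool.false_eq_true, ite_false, ite_true]
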